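-- pv_equiv track=rewrite | github.com/3BioCompBio/RSALOR | rsalor/sequence/pairwise_alignment.py | get_gaps_ranges
-- ===== SOURCE A (Python) =====
-- from typing import List, Tuple, Dict, Union
--
-- def get_gaps_ranges(align: str, tail_gaps: bool=True) -> List[Tuple[int, int]]:
--     """Return gaps ranges of alignment string."""
--
--     # Detect gaps
--     gaps_ranges = []
--     is_previous_gap = False
--     for i, aa in enumerate(align):
--         is_current_gap = aa == "-"
--         # Open gap range
--         if not is_previous_gap and is_current_gap:
--             current_gap_rang = [i]
--         # Close gap range
--         elif is_previous_gap and not is_current_gap: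
--             current_gap_rang.append(i)
--             gaps_ranges.append(current_gap_rang)
--         is_previous_gap = is_current_gap
--
--     # Mange right tail gap
--     if align[-1] == "-":
--         current_gap_rang.append(len(align))
--         gaps_ranges.append(current_gap_rang)
--
--     # Remove tail gaps if required
--     if not tail_gaps:
--         if align[0] == "-":
--             gaps_ranges = gaps_ranges[1:]
--         if align[-1] == "-":
--             gaps_ranges = gaps_ranges[:-1]
--
--     return gaps_ranges
-- ===== SOURCE B (Python) =====
-- def get_gaps_ranges(align: str, tail_gaps: bool = True):
--     """Return gaps ranges of alignment string."""
--     n = len(align)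
--     gap = [c == "-" for c in align]
--     # pair every position's gap-flag with the previous position's (False before index 0)
--     pairs = list(zip(gap, [False] + gap))
--     starts = [i for i, (g, p) in enumerate(pairs) if g and not p]
--     ends = [i for i, (g, p) in enumerate(pairs) if p and not g]
--     if n > 0 and gap[n - 1]:
--         ends.append(n)
--     ranges = [[s, e] for s, e in zip(starts, ends)]
--     if not tail_gaps:
--         if align[0] == "-":
--             ranges = ranges[1:]
--         if align[-1] == "-":
--             ranges = ranges[:-1]
--     return ranges
-- ===== Notes on version B (the rewrite author's own statement) =====
-- stated objective: alternative
-- what changed: B replaces A's stateful one-pass loop (open/close a pending range with a carried flag and a mutable partial range, plus a separate tail-closing step) by a declarative construction: pair each position's gap flag with its predecessor's via zip with a shifted list, read run starts and run ends off as two comprehensions, and zip them into ranges.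
-- crash fix: On the empty string with tail_gaps=True, A raises IndexError at align[-1] while B returns []. — e.g. on get_gaps_ranges("", true): A raises IndexError, B returns []
import Mathlib
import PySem

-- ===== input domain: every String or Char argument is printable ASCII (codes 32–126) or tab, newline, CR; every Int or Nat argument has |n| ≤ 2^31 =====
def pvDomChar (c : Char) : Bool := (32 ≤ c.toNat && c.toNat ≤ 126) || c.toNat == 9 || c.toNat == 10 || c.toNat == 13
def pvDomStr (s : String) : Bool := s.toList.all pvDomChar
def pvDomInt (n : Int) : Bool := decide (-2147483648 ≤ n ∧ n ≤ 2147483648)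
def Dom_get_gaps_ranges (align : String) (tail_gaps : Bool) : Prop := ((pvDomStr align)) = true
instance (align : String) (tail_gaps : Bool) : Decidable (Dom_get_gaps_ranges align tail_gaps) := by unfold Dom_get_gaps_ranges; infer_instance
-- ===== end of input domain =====

-- B replaces A's stateful open/close-a-pending-range loop by zipping each gap flag with its
-- predecessor's, reading run starts and ends off as two comprehensions, and zipping them (alternative).

-- ===== PORT A =====
-- A's loop body: state = (gaps_ranges, is_previous_gap, current gap start); ranges as pairs
-- (A's current_gap_rang is a 1- or 2-element list; we carry its start, closing it into a pair).
def pvStepA (st : List (Int × Int) × Bool × Int) (p : Int × Char) : List (Int × Int) × Bool × Int :=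
  let g := p.2 == '-'
  if !st.2.1 && g then (st.1, g, p.1)
  else if st.2.1 && !g then (st.1 ++ [(st.2.2, p.1)], g, st.2.2)
  else (st.1, g, st.2.2)

def get_gaps_ranges (align : String) (tail_gaps : Bool) : List (Int × Int) :=
  let cs := align.toList
  -- for i, aa in enumerate(align): ...   (current_gap_rang starts undefined; 0 is never read)
  let r := (PySem.List.enumerate cs 0).foldl pvStepA ([], false, 0)
  -- if align[-1] == "-": close the tail gap at len(align)
  let acc2 := if PySem.Str.pyGet? align (-1) = some '-' then r.1 ++ [(r.2.2, (cs.length : Int))] else r.1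
  if !tail_gaps then
    let a1 := if PySem.Str.pyGet? align 0 = some '-' then acc2.tail else acc2
    if PySem.Str.pyGet? align (-1) = some '-' then a1.dropLast else a1
  else acc2

-- ===== PORT B =====
def get_gaps_ranges_alt (align : String) (tail_gaps : Bool) : List (Int × Int) :=
  let cs := align.toList
  let n := cs.length
  let gap := cs.map (fun c => c == '-')
  let pairs := gap.zip (false :: gap)
  let starts := ((PySem.List.enumerate pairs 0).filter (fun q => q.2.1 && !q.2.2)).map (·.1)
  let ends0 := ((PySem.List.enumerate pairs 0).filter (fun q => q.2.2 && !q.2.1)).map (·.1)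
  let ends := if 0 < n ∧ gap.getD (n - 1) false = true then ends0 ++ [(n : Int)] else ends0
  let ranges := starts.zip ends
  if !tail_gaps then
    let r1 := if PySem.Str.pyGet? align 0 = some '-' then ranges.tail else ranges
    if PySem.Str.pyGet? align (-1) = some '-' then r1.dropLast else r1
  else ranges

-- ===== PRECONDITION & SPEC =====
-- Pre_ excludes only the empty string, on which A raises IndexError at align[-1].
def Pre_get_gaps_ranges (align : String) (tail_gaps : Bool) : Prop := align ≠ ""
instance (align : String) (tail_gaps : Bool) : Decidable (Pre_get_gaps_ranges align tail_gaps) := by unfold Pre_get_gaps_ranges; infer_instance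
def pvWitness_get_gaps_ranges : String × Bool := ("-ab--", false)

-- On the empty string with tail_gaps=True, A raises IndexError at align[-1] while B returns [].
def Raises_get_gaps_ranges (align : String) (tail_gaps : Bool) : Prop := align = "" ∧ tail_gaps = true
instance (align : String) (tail_gaps : Bool) : Decidable (Raises_get_gaps_ranges align tail_gaps) := by unfold Raises_get_gaps_ranges; infer_instance
def pvRaiseWitness_get_gaps_ranges : String × Bool := ("", true)
def pvRaiseWitnessOut_get_gaps_ranges : List (Int × Int) := []

def Spec_get_gaps_ranges (align : String) (tail_gaps : Bool) (out : List (Int × Int)) : Prop := out = get_gaps_ranges_alt align tail_gaps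
instance (align : String) (tail_gaps : Bool) (out : List (Int × Int)) : Decidable (Spec_get_gaps_ranges align tail_gaps out) := by unfold Spec_get_gaps_ranges; infer_instance

-- ===== CLAIM (what is proved, stated in full; the proofs are below) =====
def Claim_equal_get_gaps_ranges : Prop := ∀ (align : String) (tail_gaps : Bool), Dom_get_gaps_ranges align tail_gaps → Pre_get_gaps_ranges align tail_gaps → Spec_get_gaps_ranges align tail_gaps (get_gaps_ranges align tail_gaps)
def Claim_raises_get_gaps_ranges : Prop := (∀ (align : String) (tail_gaps : Bool), Dom_get_gaps_ranges align tail_gaps → Raises_get_gaps_ranges align tail_gaps → ¬ Pre_get_gaps_ranges align tail_gaps) ∧ (Dom_get_gaps_ranges (pvRaiseWitness_get_gaps_ranges.1) (pvRaiseWitness_get_gaps_ranges.2) ∧ Raises_get_gaps_ranges (pvRaiseWitness_get_gaps_ranges.1) (pvRaiseWitness_get_gaps_ranges.2) ∧ get_gaps_ranges_alt (pvRaiseWitness_get_gaps_ranges.1) (pvRaiseWitness_get_gaps_ranges.2) = pvRaiseWitnessOut_get_gaps_ranges)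

-- ===== LEMMAS AND PROOFS =====

-- A's fold, restated as structural recursion on the character list (acc pulled out).
def pvRuns : List Char → Int → Bool → Int → List (Int × Int) × Bool × Int
  | [], _, p, s => ([], p, s)
  | c :: cs, i, p, s =>
    if !p && (c == '-') then pvRuns cs (i + 1) (c == '-') i
    else if p && !(c == '-') then
      let r := pvRuns cs (i + 1) (c == '-') s
      ((s, i) :: r.1, r.2)
    else pvRuns cs (i + 1) (c == '-') s

-- B's start/end index lists, restated as structural recursion with the previous-gap flag.
def pvStarts : List Char → Int → Bool → List Int
  | [], _, _ => []
  | c :: cs, i, p => (if (c == '-') && !p then [i] else []) ++ pvStarts cs (i + 1) (c == '-')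

def pvEnds : List Char → Int → Bool → List Int
  | [], _, _ => []
  | c :: cs, i, p => (if p && !(c == '-') then [i] else []) ++ pvEnds cs (i + 1) (c == '-')

def pvLastGap : List Char → Bool → Bool
  | [], p => p
  | c :: cs, _ => pvLastGap cs (c == '-')

theorem pvFold_eq_runs (cs : List Char) (i : Int) (p : Bool) (s : Int) (acc : List (Int × Int)) :
    (PySem.List.enumerate cs i).foldl pvStepA (acc, p, s) =
      (acc ++ (pvRuns cs i p s).1, (pvRuns cs i p s).2) := by
  induction cs generalizing i p s acc with
  | nil => simp [pvRuns, PySem.List.enumerate_nil]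
  | cons c cs ih =>
    simp only [PySem.List.enumerate_cons, List.foldl_cons, pvRuns, pvStepA]
    by_cases hp : p <;> by_cases hg : (c == '-') = true <;>
      simp [hp, hg, ih, List.append_assoc]

theorem pvRuns_fst_map_fst (cs : List Char) (i : Int) (p : Bool) (s : Int) :
    (pvRuns cs i p s).1.map Prod.fst ++
        (if (pvRuns cs i p s).2.1 then [(pvRuns cs i p s).2.2] else []) =
      (if p then [s] else []) ++ pvStarts cs i p := by
  induction cs generalizing i p s with
  | nil => cases p <;> simp [pvRuns, pvStarts]
  | cons c cs ih =>
    simp only [pvRuns, pvStarts]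
    by_cases hp : p <;> by_cases hg : (c == '-') = true <;>
      simp [hp, hg, ih]

theorem pvRuns_fst_map_snd (cs : List Char) (i : Int) (p : Bool) (s : Int) :
    (pvRuns cs i p s).1.map Prod.snd = pvEnds cs i p := by
  induction cs generalizing i p s with
  | nil => simp [pvRuns, pvEnds]
  | cons c cs ih =>
    simp only [pvRuns, pvEnds]
    by_cases hp : p <;> by_cases hg : (c == '-') = true <;>
      simp [hp, hg, ih]

theorem pvRuns_flag (cs : List Char) (i : Int) (p : Bool) (s : Int) :
    (pvRuns cs i p s).2.1 = pvLastGap cs p := by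
  induction cs generalizing i p s with
  | nil => simp [pvRuns, pvLastGap]
  | cons c cs ih =>
    simp only [pvRuns, pvLastGap]
    by_cases hp : p <;> by_cases hg : (c == '-') = true <;>
      simp [hp, hg, ih]

theorem pvLastGap_getLast (cs : List Char) (p : Bool) (h : cs ≠ []) :
    pvLastGap cs p = decide (cs.getLast? = some '-') := by
  induction cs generalizing p with
  | nil => simp at h
  | cons c cs ih =>
    cases cs with
    | nil => simp only [pvLastGap]; rw [Bool.eq_iff_iff]; simp
    | cons d ds => simpa [pvLastGap] using ih (p := (c == '-')) (by simp)

theorem pvGapGetD (cs : List Char) (h : cs ≠ []) :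
    (cs.map (fun c => c == '-')).getD (cs.length - 1) false = decide (cs.getLast? = some '-') := by
  induction cs with
  | nil => simp at h
  | cons c cs ih =>
    cases cs with
    | nil => simp only [List.map_cons, List.map_nil, List.length_cons, List.length_nil]; simp only [List.getD]; rw [Bool.eq_iff_iff]; simp
    | cons d ds =>
      simpa using ih (by simp)

theorem pvStartsB (cs : List Char) (i : Int) (p : Bool) :
    ((PySem.List.enumerate ((cs.map (fun c => c == '-')).zip (p :: cs.map (fun c => c == '-'))) i).filter
        (fun q => q.2.1 && !q.2.2)).map (·.1) = pvStarts cs i p := by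
  induction cs generalizing i p with
  | nil => simp [pvStarts, PySem.List.enumerate_nil]
  | cons c cs ih =>
    simp only [List.map_cons, List.zip_cons_cons, PySem.List.enumerate_cons, List.filter_cons, pvStarts]
    by_cases hp : p <;> by_cases hg : (c == '-') = true <;>
      simp [hp, hg, ih]

theorem pvEndsB (cs : List Char) (i : Int) (p : Bool) :
    ((PySem.List.enumerate ((cs.map (fun c => c == '-')).zip (p :: cs.map (fun c => c == '-'))) i).filter
        (fun q => q.2.2 && !q.2.1)).map (·.1) = pvEnds cs i p := by
  induction cs generalizing i p with
  | nil => simp [pvEnds, PySem.List.enumerate_nil]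
  | cons c cs ih =>
    simp only [List.map_cons, List.zip_cons_cons, PySem.List.enumerate_cons, List.filter_cons, pvEnds]
    by_cases hp : p <;> by_cases hg : (c == '-') = true <;>
      simp [hp, hg, ih]

theorem pvZip_fst_snd {α β : Type} (l : List (α × β)) :
    (l.map Prod.fst).zip (l.map Prod.snd) = l := by
  induction l with
  | nil => rfl
  | cons x xs ih => simp [ih]

-- The untrimmed gap-range lists of the two ports agree.
theorem pvUntrimmed (align : String) (h : align.toList ≠ []) :
    (let cs := align.toList
     let r := (PySem.List.enumerate cs 0).foldl pvStepA ([], false, 0)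
     if PySem.Str.pyGet? align (-1) = some '-' then r.1 ++ [(r.2.2, (cs.length : Int))] else r.1) =
    (let cs := align.toList
     let gap := cs.map (fun c => c == '-')
     let starts := ((PySem.List.enumerate (gap.zip (false :: gap)) 0).filter (fun q => q.2.1 && !q.2.2)).map (·.1)
     let ends0 := ((PySem.List.enumerate (gap.zip (false :: gap)) 0).filter (fun q => q.2.2 && !q.2.1)).map (·.1)
     let ends := if 0 < cs.length ∧ gap.getD (cs.length - 1) false = true then ends0 ++ [(cs.length : Int)] else ends0
     starts.zip ends) := by
  simp only []
  set cs := align.toList with hcs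
  have hlast : PySem.Str.pyGet? align (-1) = cs.getLast? := by
    simp [PySem.Str.pyGet?_eq, PySem.List.pyGet?_neg_one, hcs]
  rw [pvFold_eq_runs, pvStartsB, pvEndsB]
  have hS := pvRuns_fst_map_fst cs 0 false 0
  have hE := pvRuns_fst_map_snd cs 0 false 0
  have hF := pvRuns_flag cs 0 false 0
  simp only [if_neg (by simp : ¬ (false = true)), List.nil_append] at hS
  rw [← hS, ← hE]
  have hb : (0 < cs.length ∧ (cs.map (fun c => c == '-')).getD (cs.length - 1) false = true) ↔
      (cs.getLast? = some '-') := by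
    rw [pvGapGetD cs h]
    constructor
    · rintro ⟨-, hx⟩; simpa using hx
    · intro hx; exact ⟨List.length_pos_iff.mpr h, by simp [hx]⟩
  have hflag : (pvRuns cs 0 false 0).2.1 = decide (cs.getLast? = some '-') := by
    rw [hF, pvLastGap_getLast cs false h]
  by_cases hg : cs.getLast? = some '-'
  · have h1 : PySem.Str.pyGet? align (-1) = some '-' := by rw [hlast]; exact hg
    have h2 := hb.mpr hg
    have hflag' : (pvRuns cs 0 false 0).2.1 = true := by rw [hflag]; simp [hg]
    rw [if_pos h1, if_pos h2, hflag']
    simp only [List.nil_append]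
    rw [List.zip_append (by simp)]
    simp [pvZip_fst_snd]
  · have h1 : ¬(PySem.Str.pyGet? align (-1) = some '-') := by rw [hlast]; exact hg
    have h2 : ¬(0 < cs.length ∧ (cs.map (fun c => c == '-')).getD (cs.length - 1) false = true) :=
      fun hx => hg (hb.mp hx)
    have hflag' : (pvRuns cs 0 false 0).2.1 = false := by rw [hflag]; simp [hg]
    rw [if_neg h1, if_neg h2, hflag']
    simp [pvZip_fst_snd]

-- ===== VERDICT (by name: the statement is the Claim_ definition above) =====
theorem get_gaps_ranges_spec : Claim_equal_get_gaps_ranges := by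
  intro align tail_gaps _dom pre
  unfold Spec_get_gaps_ranges get_gaps_ranges get_gaps_ranges_alt
  have h : align.toList ≠ [] := by
    intro h0
    exact pre (by rw [← String.ofList_toList (s := align), h0])
  have := pvUntrimmed align h
  simp only [] at this ⊢
  rw [this]

def get_gaps_ranges_raises : Claim_raises_get_gaps_ranges := by
  unfold Claim_raises_get_gaps_ranges
  exact ⟨fun align tg _dom hr hp => hp hr.1, by decide⟩
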